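-- pv_equiv track=rewrite | github.com/csiztom/listshuffler | listshuffler-be/src/helpers/shuffle.py | pair_up
-- ===== SOURCE A (Python) =====
-- def pair_up(list_w_sorted, used, pairs, unique=True):
--     """Tries to pair up every listitem, if it fails
--     it goes back until it finds everyone a pair, unless impossible,
--     then it doesn't pair up anything
--
--     Parameters:
--     list ([[string, [string]]]): tuples of unpaired listItemIDs like [[listItemID1, sorted [listItemID2]]]
--     used ([string]): array of used listItemID2s
--     pairs ({string: string}): already paired
--     unique (bool): if each listitem pairs up with another listitem exclusively, default True
--
--     Returns:
--     pairs ({string: string})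
--
--    """
--     if not len(list_w_sorted) > 0:
--         return pairs
--     j = 0
--     while j < len(list_w_sorted[0][1]):
--         if unique and list_w_sorted[0][1][j] in used:
--             j += 1
--             continue
--         trying_pairs = pairs.copy()
--         trying_pairs[list_w_sorted[0][0]] = list_w_sorted[0][1][j]
--         trying_used = used.copy()
--         trying_used.append(list_w_sorted[0][1][j])
--         ret = pair_up(list_w_sorted[1:], trying_used, trying_pairs, unique)
--         if ret != None:
--             return ret
--         j += 1
--     return None
-- ===== SOURCE B (Python) =====
-- def pair_up(list_w_sorted, used, pairs, unique=True):
--     """Same pairing function, restructured: the searcher is assembled back-to-front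
--     as a fold of continuation closures over an immutable set of taken partners,
--     and the result dict is built once at the end (no per-step dict/list copies)."""
--     search = lambda taken: []
--     for item, cands in reversed(list_w_sorted):
--         def step(taken, item=item, cands=cands, cont=search):
--             for cand in cands:
--                 if unique and cand in taken:
--                     continue
--                 tail = cont(taken | frozenset((cand,)))
--                 if tail is not None:
--                     return [(item, cand)] + tail
--             return None
--         search = step
--     chosen = search(frozenset(used))
--     if chosen is None:
--         return None
--     result = dict(pairs)
--     result.update(chosen)
--     return result
-- ===== Notes on version B (the rewrite author's own statement) =====
-- stated objective: alternative
-- what changed: B replaces A's recursive function that threads per-step copies of the used list and the pairs dict through a while-loop with a searcher assembled back-to-front as a right fold of continuation closures over an immutable set of taken partners, returning the chosen (item, partner) list, and builds the result dict once at the end.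
import Mathlib
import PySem

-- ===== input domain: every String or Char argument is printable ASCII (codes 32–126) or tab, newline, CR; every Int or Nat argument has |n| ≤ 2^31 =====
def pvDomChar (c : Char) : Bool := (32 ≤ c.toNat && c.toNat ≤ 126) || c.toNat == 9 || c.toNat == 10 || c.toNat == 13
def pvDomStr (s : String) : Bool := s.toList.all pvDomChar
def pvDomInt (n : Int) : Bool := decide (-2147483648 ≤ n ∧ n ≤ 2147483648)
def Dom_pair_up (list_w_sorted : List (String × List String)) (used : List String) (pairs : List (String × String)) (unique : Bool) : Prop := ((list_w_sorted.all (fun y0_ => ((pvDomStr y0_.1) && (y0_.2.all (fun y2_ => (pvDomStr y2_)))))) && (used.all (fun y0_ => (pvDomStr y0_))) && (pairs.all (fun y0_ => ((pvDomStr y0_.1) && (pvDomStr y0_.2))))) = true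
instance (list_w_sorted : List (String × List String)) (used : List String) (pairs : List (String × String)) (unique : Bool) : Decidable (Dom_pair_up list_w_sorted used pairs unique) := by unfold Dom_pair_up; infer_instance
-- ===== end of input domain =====

-- B rebuilds A's search as a right fold of continuation closures over a set of taken
-- partners and builds the result dict once at the end (objective: alternative structure;
-- return values proved equal on all inputs).

-- ===== PORT A =====
-- A: recursion on the item list; an inner while-loop over candidate indices that
-- copies the used list and the pairs dict at every attempt.
mutual
def pair_up (list_w_sorted : List (String × List String)) (used : List String) (pairs : List (String × String)) (unique : Bool) : Option (List (String × String)) :=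
  match list_w_sorted with
  | [] => some pairs
  | hd :: rest => pairUpLoop hd.1 hd.2 rest used pairs unique
termination_by (list_w_sorted.length, 0, 0)

-- the 'while j < len(...)' loop of A, one candidate at a time
def pairUpLoop (item : String) (cands : List String) (rest : List (String × List String)) (used : List String) (pairs : List (String × String)) (unique : Bool) : Option (List (String × String)) :=
  match cands with
  | [] => none
  | c :: cs =>
    if unique && used.contains c then
      pairUpLoop item cs rest used pairs unique
    else
      match pair_up rest (used ++ [c]) ((PySem.Dict.mk pairs).insert item c).items unique with
      | some ret => some ret
      | none => pairUpLoop item cs rest used pairs unique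
termination_by (rest.length, 1, cands.length)
end

-- ===== PORT B =====
-- the 'for cand in cands' loop inside one continuation closure
def pairUpAltTry (item : String) (unique : Bool)
    (cont : PySem.Set String → Option (List (String × String)))
    (taken : PySem.Set String) : List String → Option (List (String × String))
  | [] => none
  | c :: cs =>
    if unique && PySem.Set.contains taken c then
      pairUpAltTry item unique cont taken cs
    else
      match cont (PySem.Set.add taken c) with
      | some tail => some ((item, c) :: tail)
      | none => pairUpAltTry item unique cont taken cs

-- 'for item, cands in reversed(list_w_sorted): search = step(...)' — a right fold of closures
def pairUpAltSearch (unique : Bool) (l : List (String × List String)) :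
    PySem.Set String → Option (List (String × String)) :=
  l.foldr (fun ic cont taken => pairUpAltTry ic.1 unique cont taken ic.2)
    (fun _ => some [])

def pair_up_alt (list_w_sorted : List (String × List String)) (used : List String) (pairs : List (String × String)) (unique : Bool) : Option (List (String × String)) :=
  match pairUpAltSearch unique list_w_sorted (PySem.Set.ofList used) with
  | none => none
  | some chosen =>
      -- result = dict(pairs); result.update(chosen)
      (chosen.foldl (fun d kv => d.insert kv.1 kv.2) (PySem.Dict.mk pairs)).items

-- ===== PRECONDITION & SPEC =====
def Spec_pair_up (list_w_sorted : List (String × List String)) (used : List String) (pairs : List (String × String)) (unique : Bool) (out : Option (List (String × String))) : Prop := out = pair_up_alt list_w_sorted used pairs unique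
instance (list_w_sorted : List (String × List String)) (used : List String) (pairs : List (String × String)) (unique : Bool) (out : Option (List (String × String))) : Decidable (Spec_pair_up list_w_sorted used pairs unique out) := by unfold Spec_pair_up; infer_instance

-- ===== CLAIM (what is proved, stated in full; the proofs are below) =====
def Claim_equal_pair_up : Prop := ∀ (list_w_sorted : List (String × List String)) (used : List String) (pairs : List (String × String)) (unique : Bool), Dom_pair_up list_w_sorted used pairs unique → Spec_pair_up list_w_sorted used pairs unique (pair_up list_w_sorted used pairs unique)

-- ===== LEMMAS AND PROOFS =====

-- membership in a Set built by 'add' matches membership in the appended used-list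
lemma mem_add_iff_append (taken : PySem.Set String) (used : List String) (c x : String)
    (h : ∀ y, y ∈ taken ↔ y ∈ used) :
    x ∈ PySem.Set.add taken c ↔ x ∈ used ++ [c] := by
  simp [PySem.Set.mem_add, h x, List.mem_append]

-- Bool-level: the if-conditions of the two loops agree
lemma contains_eq_of_mem_iff (taken : PySem.Set String) (used : List String)
    (h : ∀ y, y ∈ taken ↔ y ∈ used) (c : String) :
    PySem.Set.contains taken c = used.contains c := by
  have := h c
  simp only [PySem.Set.contains_eq_listContains]
  by_cases hc : c ∈ used
  · simp [hc, this.mpr hc]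
  · have hnt : c ∉ taken := fun hx => hc (this.mp hx)
    simp [hc, hnt]

-- main invariant: A over (used, pairs) equals B's folded searcher over any set with
-- the same members as used, post-processed by the single dict build
lemma pairUp_eq_search (l : List (String × List String)) :
    ∀ (used : List String) (taken : PySem.Set String) (d : PySem.Dict String String) (unique : Bool),
    (∀ y, y ∈ taken ↔ y ∈ used) →
    pair_up l used d.items unique =
      (pairUpAltSearch unique l taken).map
        (fun chosen => (chosen.foldl (fun d kv => d.insert kv.1 kv.2) d).items) := by
  induction l with
  | nil =>
    intro used taken d unique _
    simp [pair_up, pairUpAltSearch]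
  | cons hd rest ih =>
    intro used taken d unique hmem
    have loop : ∀ (cands : List String),
        pairUpLoop hd.1 cands rest used d.items unique =
          (pairUpAltTry hd.1 unique (pairUpAltSearch unique rest) taken cands).map
            (fun chosen => (chosen.foldl (fun d kv => d.insert kv.1 kv.2) d).items) := by
      intro cands
      induction cands with
      | nil => simp [pairUpLoop, pairUpAltTry]
      | cons c cs ihc =>
        rw [pairUpLoop, pairUpAltTry]
        rw [contains_eq_of_mem_iff taken used hmem c]
        by_cases hcond : (unique && used.contains c) = true
        · simp only [hcond, if_true, ihc]
        · simp only [Bool.not_eq_true] at hcond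
          simp only [hcond]
          have hrec := ih (used ++ [c]) (PySem.Set.add taken c) (d.insert hd.1 c) unique
            (fun y => mem_add_iff_append taken used c y hmem)
          have hd_items : ((PySem.Dict.mk d.items).insert hd.1 c).items = (d.insert hd.1 c).items := rfl
          rw [hd_items, hrec]
          cases pairUpAltSearch unique rest (PySem.Set.add taken c) with
          | none => simp [ihc]
          | some tail => simp [List.foldl_cons]
    rw [pair_up]
    exact loop hd.2

lemma pairUp_eq_alt (l : List (String × List String)) (used : List String)
    (pairs : List (String × String)) (unique : Bool) :
    pair_up l used pairs unique = pair_up_alt l used pairs unique := by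
  have h := pairUp_eq_search l used (PySem.Set.ofList used) (PySem.Dict.mk pairs) unique
    (fun y => PySem.Set.mem_ofList used y)
  have hitems : (PySem.Dict.mk pairs).items = pairs := rfl
  rw [hitems] at h
  rw [h]
  unfold pair_up_alt
  cases pairUpAltSearch unique l (PySem.Set.ofList used) <;> rfl

-- ===== VERDICT (by name: the statement is the Claim_ definition above) =====
theorem pair_up_spec : Claim_equal_pair_up := by
  intro l used pairs unique _
  unfold Spec_pair_up
  exact pairUp_eq_alt l used pairs unique
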